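-- pv_equiv track=rewrite | github.com/Dibrary/Algorithm_playground | programmers/H-index.py | solution
-- ===== SOURCE A (Python) =====
-- def solution(citations):
--     citations.sort()
--
--     max_value = citations[-1]
--     min_value = citations[0]
--     maximum_value = 0
--
--     for x in range(min_value, max_value):
--         lower = len([m for m in citations if m <= x]) # x번 이하 인용되었다면, x번까지 포함.
--         higher = len([m for m in citations if m >= x]) # x번 이상 인용되었다면, x번까지 포함.
--         if lower <= x and higher >= x:
--             if maximum_value <= x:
--                 maximum_value = x
--
--     return maximum_value
-- ===== SOURCE B (Python) =====
-- def _prefix_len(s, pred):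
--     # length of the maximal prefix of sorted list s whose elements satisfy pred
--     # (hand-written binary search; the module may not import bisect)
--     lo, hi = 0, len(s)
--     while lo < hi:
--         mid = (lo + hi) // 2
--         if pred(s[mid]):
--             lo = mid + 1
--         else:
--             hi = mid
--     return lo
--
-- def solution(citations):
--     s = sorted(citations)
--     n = len(s)
--     best = 0
--     for x in range(s[0], s[-1]):
--         lower = _prefix_len(s, lambda m: m <= x)
--         higher = n - _prefix_len(s, lambda m: m < x)
--         if lower <= x <= higher:
--             best = x
--     return best
-- ===== Notes on version B (the rewrite author's own statement) =====
-- stated objective: faster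
-- what changed: B replaces A's two O(n) list-comprehension scans per candidate x by two hand-written binary searches on the sorted list (prefix length of elements <=x resp. <x), so the inner scans disappear; B also sorts a copy instead of mutating the argument.
-- outside the precondition, e.g. on solution([]): A raises IndexError, B raises IndexError
import Mathlib
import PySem

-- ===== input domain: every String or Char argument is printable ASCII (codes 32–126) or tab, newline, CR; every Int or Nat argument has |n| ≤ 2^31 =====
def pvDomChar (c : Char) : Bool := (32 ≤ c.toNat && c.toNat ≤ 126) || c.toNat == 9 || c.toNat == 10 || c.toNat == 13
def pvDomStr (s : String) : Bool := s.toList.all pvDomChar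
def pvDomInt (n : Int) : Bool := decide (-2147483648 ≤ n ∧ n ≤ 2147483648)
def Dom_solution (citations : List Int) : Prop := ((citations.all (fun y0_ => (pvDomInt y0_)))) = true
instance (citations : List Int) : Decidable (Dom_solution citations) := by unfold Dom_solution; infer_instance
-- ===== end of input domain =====

-- B counts elements <= x and < x by hand-written binary search on the sorted list instead of
-- A's two linear list-comprehension scans per candidate (objective: faster). A sorts its
-- argument in place and B does not; the equivalence proved here is about the return value only.

-- ===== PORT A =====
def solution (citations : List Int) : Int :=
  let s := PySem.List.sorted citations (fun m => m) false
  match PySem.List.pyGet? s (-1), PySem.List.pyGet? s 0 with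
  | some max_value, some min_value =>
    (PySem.List.pyRange min_value max_value 1).foldl (fun maximum_value x =>
      let lower : Int := (s.filter (fun m => decide (m ≤ x))).length
      let higher : Int := (s.filter (fun m => decide (m ≥ x))).length
      if lower ≤ x ∧ higher ≥ x then
        (if maximum_value ≤ x then x else maximum_value)
      else maximum_value) 0
  | _, _ => 0

-- ===== PORT B =====
-- Source B's hand-written binary search (the module may not import bisect): length of the maximal
-- prefix of the sorted list s satisfying pred.  The 'none' branch is Python's IndexError on
-- s[mid]; callers pass hi ≤ len(s), so mid is always in range.
def prefixLen (s : List Int) (p : Int → Bool) (lo hi : Nat) : Nat :=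
  if _h : lo < hi then
    match s[(lo + hi) / 2]? with
    | some v => if p v then prefixLen s p ((lo + hi) / 2 + 1) hi else prefixLen s p lo ((lo + hi) / 2)
    | none => lo
  else lo
termination_by hi - lo
decreasing_by all_goals omega

def solution_alt (citations : List Int) : Int :=
  let s := PySem.List.sorted citations (fun m => m) false
  match PySem.List.pyGet? s 0 with
  | none => 0
  | some mn =>
    match PySem.List.pyGet? s (-1) with
    | none => 0
    | some mx =>
      let n : Int := s.length
      (PySem.List.pyRange mn mx 1).foldl (fun best x =>
        let lower : Int := prefixLen s (fun m => decide (m ≤ x)) 0 s.length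
        let higher : Int := n - prefixLen s (fun m => decide (m < x)) 0 s.length
        if lower ≤ x ∧ x ≤ higher then x else best) 0

-- ===== PRECONDITION & SPEC =====
-- A raises IndexError on the empty list (citations[-1]); Pre_ excludes exactly that input.
def Pre_solution (citations : List Int) : Prop := citations ≠ []
instance (citations : List Int) : Decidable (Pre_solution citations) := by unfold Pre_solution; infer_instance
def pvWitness_solution : List Int := ([3, 0, 6, 1, 5])

def Spec_solution (citations : List Int) (out : Int) : Prop := out = solution_alt citations
instance (citations : List Int) (out : Int) : Decidable (Spec_solution citations out) := by unfold Spec_solution; infer_instance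

-- ===== CLAIM (what is proved, stated in full; the proofs are below) =====
def Claim_equal_solution : Prop := ∀ (citations : List Int), Dom_solution citations → Pre_solution citations → Spec_solution citations (solution citations)

-- ===== LEMMAS AND PROOFS =====

-- on a sorted list, a downward-closed predicate holds exactly on the prefix of length countP
lemma pvSortedPrefixIff (p : Int → Bool) (hmono : ∀ a b : Int, a ≤ b → p b = true → p a = true) :
    ∀ (s : List Int), s.Pairwise (· ≤ ·) → ∀ (i : Nat) (h : i < s.length),
      (p s[i] = true ↔ i < s.countP p) := by
  intro s
  induction s with
  | nil => intro _ i h; simp at h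
  | cons a t ih =>
    intro hp i h
    obtain ⟨ha, ht⟩ := List.pairwise_cons.mp hp
    cases i with
    | zero =>
      simp only [List.getElem_cons_zero, List.countP_cons]
      by_cases hb : p a = true
      · simp [hb]
      · have hz : t.countP p = 0 :=
          List.countP_eq_zero.mpr (fun y hy hpy => hb (hmono a y (ha y hy) hpy))
        simp [hb, hz]
    | succ i =>
      have hi : i < t.length := by simpa using h
      simp only [List.getElem_cons_succ, List.countP_cons]
      by_cases hb : p a = true
      · rw [ih ht i hi]
        simp only [hb, if_true]
        omega
      · have hz : t.countP p = 0 :=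
          List.countP_eq_zero.mpr (fun y hy hpy => hb (hmono a y (ha y hy) hpy))
        have hpi : p t[i] = false := by
          cases hpe : p t[i] with
          | false => rfl
          | true => exact absurd (hmono a t[i] (ha _ (List.getElem_mem hi)) hpe) hb
        simp [hb, hz, hpi]

-- Source B's binary search returns countP p when p holds exactly on the prefix of that length
lemma pvPrefixLenEqAux (s : List Int) (p : Int → Bool)
    (hchar : ∀ (i : Nat) (h : i < s.length), (p s[i] = true ↔ i < s.countP p)) :
    ∀ (f lo hi : Nat), hi - lo ≤ f → lo ≤ s.countP p → s.countP p ≤ hi → hi ≤ s.length →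
      prefixLen s p lo hi = s.countP p := by
  intro f
  induction f with
  | zero =>
    intro lo hi hf h1 h2 h3
    rw [prefixLen]
    have hlt : ¬ lo < hi := by omega
    simp only [hlt, dif_neg, not_false_iff]
    omega
  | succ f ihf =>
    intro lo hi hf h1 h2 h3
    rw [prefixLen]
    by_cases hlt : lo < hi
    · simp only [hlt, dif_pos]
      have hmn : (lo + hi) / 2 < s.length := by omega
      rw [List.getElem?_eq_getElem hmn]
      by_cases hp : p s[(lo + hi) / 2] = true
      · have hc : (lo + hi) / 2 < s.countP p := (hchar _ hmn).mp hp
        simp only [hp, if_true]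
        exact ihf ((lo + hi) / 2 + 1) hi (by omega) (by omega) h2 h3
      · have hc : ¬ (lo + hi) / 2 < s.countP p := fun hc => hp ((hchar _ hmn).mpr hc)
        simp only [hp]
        exact ihf lo ((lo + hi) / 2) (by omega) h1 (by omega) (by omega)
    · simp only [hlt, dif_neg, not_false_iff]
      omega

lemma pvPrefixLenEq (s : List Int) (p : Int → Bool)
    (hchar : ∀ (i : Nat) (h : i < s.length), (p s[i] = true ↔ i < s.countP p)) :
    prefixLen s p 0 s.length = s.countP p :=
  pvPrefixLenEqAux s p hchar s.length 0 s.length (by omega) (by omega)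
    (List.countP_le_length) (le_refl _)

-- A's running-max fold over a strictly increasing list equals B's overwrite fold,
-- provided every qualifying element is ≥ the initial accumulator
lemma pvFoldMaxEqOverwrite (Q : Int → Prop) [DecidablePred Q] :
    ∀ (l : List Int), l.Pairwise (· < ·) → ∀ (init : Int), (∀ y ∈ l, Q y → init ≤ y) →
      l.foldl (fun mv x => if Q x then (if mv ≤ x then x else mv) else mv) init =
      l.foldl (fun mv x => if Q x then x else mv) init := by
  intro l
  induction l with
  | nil => intro _ init _; rfl
  | cons a t ih =>
    intro hp init hinit
    obtain ⟨hat, htp⟩ := List.pairwise_cons.mp hp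
    simp only [List.foldl_cons]
    by_cases hq : Q a
    · have hle : init ≤ a := hinit a (List.mem_cons_self) hq
      simp only [hq, if_true, hle]
      exact ih htp a (fun y hy _ => le_of_lt (hat y hy))
    · simp only [hq, if_false]
      exact ih htp init (fun y hy hqy => hinit y (List.mem_cons_of_mem _ hy) hqy)

-- the two counts agree: countP(≤x) is the 'lower' filter length and
-- n - countP(<x) is the 'higher' filter length
lemma pvCountLe (s : List Int) (x : Int) :
    (s.countP (fun m => decide (m ≤ x)) : Int) = ((s.filter (fun m => decide (m ≤ x))).length : Int) := by
  rw [List.countP_eq_length_filter]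

lemma pvCountGe (s : List Int) (x : Int) :
    (s.length : Int) - (s.countP (fun m => decide (m < x)) : Int) =
      ((s.filter (fun m => decide (m ≥ x))).length : Int) := by
  have h1 := List.length_eq_countP_add_countP (p := fun m : Int => decide (m < x)) (l := s)
  have h2 : s.countP (fun a => decide ¬decide (a < x) = true) =
      (s.filter (fun m => decide (m ≥ x))).length := by
    rw [List.countP_eq_length_filter]
    congr 1
    apply List.filter_congr
    intro m _
    simp [not_lt, ge_iff_le]
  omega

-- ===== VERDICT (by name: the statement is the Claim_ definition above) =====
theorem solution_spec : Claim_equal_solution := by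
  intro citations _ hpre
  unfold Spec_solution
  simp only [solution, solution_alt]
  have hs : (PySem.List.sorted citations (fun m => m) false).Pairwise (· ≤ ·) := by
    have := PySem.List.sorted_pairwise citations (fun m => m) (κ := Int)
    simpa using this
  generalize hgen : PySem.List.sorted citations (fun m => m) false = s at hs
  have hsne : s ≠ [] := by
    rw [← hgen, Ne, PySem.List.sorted_eq_nil_iff]
    exact hpre
  cases hg1 : PySem.List.pyGet? s (-1) with
  | none =>
    rw [PySem.List.pyGet?_neg_one] at hg1
    exact absurd (List.getLast?_eq_none_iff.mp hg1) hsne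
  | some mx =>
    cases hg0 : PySem.List.pyGet? s 0 with
    | none =>
      -- the goal is closed by rw's rfl attempt: both ports return 0 here
      rw [PySem.List.pyGet?_zero] at hg0
    | some mn =>
      simp only
      set Q : Int → Prop := fun x =>
        ((s.filter (fun m => decide (m ≤ x))).length : Int) ≤ x ∧
        ((s.filter (fun m => decide (m ≥ x))).length : Int) ≥ x with hQ
      have hcond : ∀ x : Int,
          ((prefixLen s (fun m => decide (m ≤ x)) 0 s.length : Int) ≤ x ∧
           x ≤ (s.length : Int) - (prefixLen s (fun m => decide (m < x)) 0 s.length : Int)) ↔ Q x := by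
        intro x
        have hle := pvPrefixLenEq s (fun m => decide (m ≤ x))
          (pvSortedPrefixIff (fun m => decide (m ≤ x))
            (by intro a b hab hb; simp only [decide_eq_true_eq] at hb ⊢; omega) s hs)
        have hlt := pvPrefixLenEq s (fun m => decide (m < x))
          (pvSortedPrefixIff (fun m => decide (m < x))
            (by intro a b hab hb; simp only [decide_eq_true_eq] at hb ⊢; omega) s hs)
        rw [hle, hlt, hQ]
        constructor
        · rintro ⟨h1, h2⟩
          exact ⟨by rw [← pvCountLe]; exact h1, by rw [← pvCountGe]; exact h2⟩
        · rintro ⟨h1, h2⟩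
          exact ⟨by rw [pvCountLe]; exact h1, by rw [pvCountGe]; exact h2⟩
      have hQnn : ∀ x, Q x → (0:Int) ≤ x := fun x hx =>
        le_trans (Int.natCast_nonneg _) hx.1
      have hBfold :
          (PySem.List.pyRange mn mx 1).foldl (fun best x =>
            if (prefixLen s (fun m => decide (m ≤ x)) 0 s.length : Int) ≤ x ∧
               x ≤ (s.length : Int) - (prefixLen s (fun m => decide (m < x)) 0 s.length : Int)
            then x else best) 0 =
          (PySem.List.pyRange mn mx 1).foldl (fun best x => if Q x then x else best) 0 := by
        apply List.foldl_ext
        intro best x _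
        exact if_congr (hcond x) rfl rfl
      rw [hBfold]
      exact pvFoldMaxEqOverwrite Q (PySem.List.pyRange mn mx 1)
        (PySem.List.pairwise_lt_pyRange_one mn mx) 0
        (fun y _ hy => hQnn y hy)
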